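-- pv_equiv track=rewrite | github.com/Wellan76/code-de-vigen-re | Projet_info_n1.py | IC3
-- ===== SOURCE A (Python) =====
-- def IC3(a:int):
--     str = ""
--     sous_chaine = []
--     for j in range(0,3):
--         for i in range(j,len(a),3):
--             str = str + a[i]
--         sous_chaine.append(str)
--         str = ""
--     return sous_chaine
-- ===== SOURCE B (Python) =====
-- def IC3(a):
--     sous_chaine = [[], [], []]
--     for i, ch in enumerate(a):
--         sous_chaine[i % 3].append(ch)
--     return [''.join(s) for s in sous_chaine]
-- ===== Notes on version B (the rewrite author's own statement) =====
-- stated objective: alternative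
-- what changed: Replaces A's three separate strided passes (one per residue class j, scanning indices j, j+3, ...) by a single enumerate pass that distributes each character into bucket i % 3.
import Mathlib
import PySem

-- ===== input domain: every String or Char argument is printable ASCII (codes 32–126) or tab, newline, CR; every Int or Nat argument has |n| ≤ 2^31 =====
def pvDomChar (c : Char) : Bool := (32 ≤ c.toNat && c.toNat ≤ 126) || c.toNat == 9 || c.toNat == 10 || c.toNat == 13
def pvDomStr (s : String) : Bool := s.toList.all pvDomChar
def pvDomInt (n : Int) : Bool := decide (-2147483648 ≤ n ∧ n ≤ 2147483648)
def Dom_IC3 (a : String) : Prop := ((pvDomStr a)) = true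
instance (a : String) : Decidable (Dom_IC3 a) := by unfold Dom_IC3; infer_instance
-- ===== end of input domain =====

-- B replaces A's three strided scans (one per residue class) by a single enumerate
-- pass that distributes each character into bucket i % 3 (objective: alternative).

-- ===== PORT A =====
-- Faithful port of A over a.toList: the outer loop over range(0,3), an inner loop
-- over range(j, len(a), 3) appending a[i] (index always in range, so the none case
-- of pyGet? never occurs and appending its .toList is exact).
def IC3 (a : String) : List String :=
  let l := a.toList
  ((PySem.List.pyRange 0 3 1).foldl
    (fun (st : List Char × List String) (j : Int) =>
      let s := (PySem.List.pyRange j (l.length : Int) 3).foldl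
                 (fun s i => s ++ (PySem.List.pyGet? l i).toList) st.1
      (([] : List Char), st.2 ++ [String.mk s]))
    ([], [])).2

-- ===== PORT B =====
-- Faithful port of Source B: sous_chaine = [[], [], []] is the triple of char-list
-- accumulators, one enumerate pass appending each char to bucket i % 3, then
-- ''.join of each bucket (String.mk).
def IC3_alt (a : String) : List String :=
  let p := (PySem.List.enumerate a.toList 0).foldl
    (fun (s : List Char × List Char × List Char) (ic : Int × Char) =>
      if PySem.Int.mod ic.1 3 = 0 then (s.1 ++ [ic.2], s.2.1, s.2.2)
      else if PySem.Int.mod ic.1 3 = 1 then (s.1, s.2.1 ++ [ic.2], s.2.2)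
      else (s.1, s.2.1, s.2.2 ++ [ic.2]))
    (([] : List Char), ([] : List Char), ([] : List Char))
  [String.mk p.1, String.mk p.2.1, String.mk p.2.2]

-- ===== PRECONDITION & SPEC =====
def Spec_IC3 (a : String) (out : List String) : Prop := out = IC3_alt a
instance (a : String) (out : List String) : Decidable (Spec_IC3 a out) := by unfold Spec_IC3; infer_instance

-- ===== CLAIM (what is proved, stated in full; the proofs are below) =====
def Claim_equal_IC3 : Prop := ∀ (a : String), Dom_IC3 a → Spec_IC3 a (IC3 a)

-- ===== LEMMAS AND PROOFS =====

-- chars at positions 0, 3, 6, … of l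
def stride : List Char → List Char
  | [] => []
  | c :: t => c :: stride (t.drop 2)
termination_by l => l.length
decreasing_by simp

theorem stride_nil : stride [] = [] := by unfold stride; rfl

theorem stride_cons (c : Char) (t : List Char) :
    stride (c :: t) = c :: stride (t.drop 2) := by rw [stride.eq_def]

-- the three residue-class buckets of l, by one structural recursion
def rot3 : List Char → List Char × List Char × List Char
  | [] => ([], [], [])
  | c :: t =>
    let r := rot3 t
    (c :: r.2.2, r.1, r.2.1)

theorem rot3_eq_stride (l : List Char) :
    rot3 l = (stride l, stride (l.drop 1), stride (l.drop 2)) := by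
  induction l with
  | nil => simp [rot3, stride_nil]
  | cons c t ih =>
    simp only [rot3, ih, stride_cons]
    cases t with
    | nil => simp [stride_nil]
    | cons d u => simp [stride_cons]

theorem pyRange3_nil (a b : Int) (h : b ≤ a) : PySem.List.pyRange a b 3 = [] := by
  rw [PySem.List.pyRange_of_pos a b (by norm_num)]
  simp [not_lt.mpr h]

theorem pyRange3_cons (a b : Int) (h : a < b) :
    PySem.List.pyRange a b 3 = a :: PySem.List.pyRange (a + 3) b 3 := by
  rw [PySem.List.pyRange_of_pos a b (by norm_num),
      PySem.List.pyRange_of_pos (a + 3) b (by norm_num)]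
  have hn : (if a < b then ((b - a + 3 - 1) / 3).toNat else 0)
      = (if a + 3 < b then ((b - (a + 3) + 3 - 1) / 3).toNat else 0) + 1 := by
    split_ifs <;> omega
  rw [hn, List.range_succ_eq_map]
  simp only [List.map_cons, List.map_map]
  refine List.cons_eq_cons.mpr ⟨by norm_num, ?_⟩
  apply List.map_congr_left
  intro k _
  simp [Function.comp]
  ring

-- A's inner loop over range(j, len l, 3) collects exactly stride (l.drop j)
theorem innerA (l : List Char) :
    ∀ (n j : Nat) (s : List Char), l.length - j ≤ n →
    (PySem.List.pyRange (j : Int) (l.length : Int) 3).foldl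
      (fun s i => s ++ (PySem.List.pyGet? l i).toList) s
      = s ++ stride (l.drop j) := by
  intro n
  induction n with
  | zero =>
    intro j s h
    have hj : l.length ≤ j := by omega
    rw [pyRange3_nil _ _ (by exact_mod_cast hj), List.drop_eq_nil_of_le hj]
    simp [stride_nil]
  | succ n ih =>
    intro j s h
    by_cases hj : j < l.length
    · rw [pyRange3_cons _ _ (by exact_mod_cast hj)]
      simp only [List.foldl_cons]
      have hcast : ((j : Int) + 3) = ((j + 3 : Nat) : Int) := by push_cast; ring
      rw [PySem.List.pyGet?_ofNat (h := hj), hcast, ih (j + 3) _ (by omega)]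
      have hdrop : l.drop j = l[j] :: l.drop (j + 1) := (List.getElem_cons_drop hj).symm
      have h23 : j + 1 + 2 = j + 3 := by omega
      have hstride : stride (l.drop j) = l[j] :: stride (l.drop (j + 3)) := by
        rw [hdrop, stride_cons, List.drop_drop, h23]
      rw [hstride]
      simp only [Option.toList_some, List.append_assoc, List.singleton_append]
    · have hlj : l.length ≤ j := by omega
      rw [pyRange3_nil _ _ (by exact_mod_cast hlj), List.drop_eq_nil_of_le hlj]
      simp [stride_nil]

-- B's single pass, started at offset k, fills the buckets of rot3 rotated by k % 3
theorem innerB (l : List Char) :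
    ∀ (k : Nat) (s0 s1 s2 : List Char),
    (PySem.List.enumerate l (k : Int)).foldl
      (fun (s : List Char × List Char × List Char) (ic : Int × Char) =>
        if PySem.Int.mod ic.1 3 = 0 then (s.1 ++ [ic.2], s.2.1, s.2.2)
        else if PySem.Int.mod ic.1 3 = 1 then (s.1, s.2.1 ++ [ic.2], s.2.2)
        else (s.1, s.2.1, s.2.2 ++ [ic.2]))
      (s0, s1, s2)
      = (if k % 3 = 0 then (s0 ++ (rot3 l).1, s1 ++ (rot3 l).2.1, s2 ++ (rot3 l).2.2)
         else if k % 3 = 1 then (s0 ++ (rot3 l).2.2, s1 ++ (rot3 l).1, s2 ++ (rot3 l).2.1)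
         else (s0 ++ (rot3 l).2.1, s1 ++ (rot3 l).2.2, s2 ++ (rot3 l).1)) := by
  induction l with
  | nil => intro k s0 s1 s2; split_ifs <;> simp [rot3, PySem.List.enumerate]
  | cons c t ih =>
    intro k s0 s1 s2
    rw [PySem.List.enumerate_cons]
    simp only [List.foldl_cons]
    have hmod : PySem.Int.mod (k : Int) 3 = ((k % 3 : Nat) : Int) := by
      exact_mod_cast PySem.Int.mod_natCast k 3
    have hk1 : ((k : Int) + 1) = ((k + 1 : Nat) : Int) := by push_cast; ring
    rcases (by omega : k % 3 = 0 ∨ k % 3 = 1 ∨ k % 3 = 2) with h | h | h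
    · simp only [hmod, h, hk1, Nat.cast_zero, reduceIte]
      rw [ih]
      have h' : (k + 1) % 3 = 1 := by omega
      simp [h', rot3]
    · simp only [hmod, h, hk1, Nat.cast_one, reduceIte]
      rw [ih]
      have h' : (k + 1) % 3 = 2 := by omega
      simp [h', rot3]
    · simp only [hmod, h, hk1, Nat.cast_ofNat]
      rw [ih]
      have h' : (k + 1) % 3 = 0 := by omega
      simp [h', rot3]

-- ===== VERDICT (by name: the statement is the Claim_ definition above) =====
theorem IC3_spec : Claim_equal_IC3 := by
  intro a _
  unfold Spec_IC3 IC3 IC3_alt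
  set l := a.toList with hl
  have h3 : PySem.List.pyRange 0 3 1 = [0, 1, 2] := by decide
  rw [h3]
  simp only [List.foldl_cons, List.foldl_nil]
  have hA0 := innerA l l.length 0 [] (by omega)
  have hA1 := innerA l l.length 1 [] (by omega)
  have hA2 := innerA l l.length 2 [] (by omega)
  have hB := innerB l 0 [] [] []
  simp only [Nat.cast_zero, Nat.cast_one, Nat.cast_ofNat, List.nil_append] at hA0 hA1 hA2 hB
  rw [hA0, hA1, hA2, hB, rot3_eq_stride]
  simp
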